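-- pv_equiv track=rewrite | github.com/dgrim3434/agentic_financial_advisor | src/agents/crews/investment_strategy_crew.py | _split_sections_by_ticker
-- ===== SOURCE A (Python) =====
-- from typing import Any, Dict, List, Tuple
--
-- def _split_sections_by_ticker(text: str, tickers: List[str]) -> Dict[str, str]:
--     """
--     Take a long markdown string and break it into per-ticker sections.
--
--     Assumes the text uses headers like:
--
--         ### AAPL
--         ...notes...
--
--         ### MSFT
--         ...notes...
--
--     Returns a mapping like:
--         {
--           "AAPL": "...AAPL section...",
--           "MSFT": "...MSFT section...",
--           ...
--         }
--
--     If a ticker doesn’t appear, it just gets an empty string.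
--     """
--     result: Dict[str, str] = {t: "" for t in tickers}
--     if not text:
--         return result
--
--     # Find where each ticker header starts
--     positions: List[Tuple[int, str]] = []
--     for t in tickers:
--         header = f"### {t}"
--         idx = text.find(header)
--         if idx != -1:
--             positions.append((idx, t))
--
--     if not positions:
--         # No recognizable headers; return the empty structure
--         return result
--
--     # Process headers in the order they appear in the text
--     positions.sort(key=lambda x: x[0])
--
--     # Slice from each header up to the next one
--     for i, (start_idx, ticker) in enumerate(positions):
--         end_idx = positions[i + 1][0] if i + 1 < len(positions) else len(text)
--         block = text[start_idx:end_idx].strip()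
--         result[ticker] = block
--
--     return result
-- ===== SOURCE B (Python) =====
-- from typing import Dict, List, Tuple
--
-- def _split_sections_by_ticker(text: str, tickers: List[str]) -> Dict[str, str]:
--     # One left-to-right scan over the text: collect every "### " mark once,
--     # then claim each ticker at the first mark whose header matches it.
--     # No per-ticker search over the whole text and no sort: the claims come
--     # out already ordered by position.
--     result: Dict[str, str] = {t: "" for t in tickers}
--     if not text:
--         return result
--
--     # All positions where a header can start, in increasing order (single scan).
--     marks: List[int] = []
--     j = text.find("### ")
--     while j != -1:
--         marks.append(j)
--         j = text.find("### ", j + 1)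
--
--     # Claim each still-unclaimed ticker at the first mark matching it.
--     claims: List[Tuple[int, str]] = []
--     pending = list(tickers)
--     for j in marks:
--         matched = [t for t in pending if text.startswith(t, j + 4)]
--         claims.extend((j, t) for t in matched)
--         pending = [t for t in pending if t not in matched]
--
--     # Slice each claimed block up to the next claimed mark.
--     for k, (start, t) in enumerate(claims):
--         end = claims[k + 1][0] if k + 1 < len(claims) else len(text)
--         result[t] = text[start:end].strip()
--     return result
-- ===== Notes on version B (the rewrite author's own statement) =====
-- stated objective: faster
-- what changed: Instead of running text.find over the whole text once per ticker and then sorting the hits, B collects every '### ' mark in one scan of the text and claims each still-unclaimed ticker at the first mark whose header matches it, so the claims come out already ordered by position and no per-ticker full-text search and no sort are needed.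
import Mathlib
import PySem

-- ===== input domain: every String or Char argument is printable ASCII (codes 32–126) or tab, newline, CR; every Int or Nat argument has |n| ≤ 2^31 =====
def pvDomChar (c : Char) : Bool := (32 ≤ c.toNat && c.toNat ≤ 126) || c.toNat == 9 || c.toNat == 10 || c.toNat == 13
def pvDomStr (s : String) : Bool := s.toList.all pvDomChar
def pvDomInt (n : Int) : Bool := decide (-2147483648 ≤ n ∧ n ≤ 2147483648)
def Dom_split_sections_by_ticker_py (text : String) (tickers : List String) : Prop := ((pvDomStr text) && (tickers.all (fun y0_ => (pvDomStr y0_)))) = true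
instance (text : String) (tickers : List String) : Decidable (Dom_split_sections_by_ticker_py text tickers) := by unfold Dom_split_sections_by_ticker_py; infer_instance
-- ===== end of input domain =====

-- B replaces A's per-ticker full-text find + sort with one scan that collects every "### " mark
-- and claims each ticker at its first matching mark in text order (objective: faster).


-- ===== PORT A =====
def pvHdr : List Char := ['#', '#', '#', ' ']

def split_sections_by_ticker_py (text : String) (tickers : List String) : List (String × String) :=
  -- result = {t: "" for t in tickers}
  let result : PySem.Dict String String :=
    tickers.foldl (fun d t => d.insert t "") PySem.Dict.empty
  -- if not text: return result
  if text.toList = [] then result.items else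
  -- for t in tickers: idx = text.find("### " + t); if idx != -1: positions.append((idx, t))
  let positions : List (Int × String) :=
    tickers.foldl (fun ps t =>
      let idx := PySem.Chars.find text.toList (pvHdr ++ t.toList)
      if idx ≠ -1 then ps ++ [(idx, t)] else ps) []
  if positions = [] then result.items else
  -- positions.sort(key=lambda x: x[0])
  let positions2 := PySem.List.sorted positions (·.1)
  -- for i, (start_idx, ticker) in enumerate(positions): ... result[ticker] = block
  let result2 := (PySem.List.enumerate positions2).foldl (fun res it =>
      let endIdx : Int :=
        if it.1 + 1 < PySem.List.len positions2
        then (PySem.List.pyGetD positions2 (it.1 + 1) (0, "")).1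
        else PySem.List.len text.toList
      let block := PySem.Chars.strip (PySem.Chars.slice text.toList (some it.2.1) (some endIdx))
      res.insert it.2.2 (String.ofList block)) result
  result2.items


-- ===== PORT B =====
-- while j != -1: marks.append(j); j = text.find("### ", j + 1)
-- (the `j ≤ cs.length` conjunct is a termination-only guard: findFrom returns -1 there anyway)
def pvCollectMarks (cs : List Char) (j : Nat) : List Nat :=
  let r := PySem.Chars.findFrom cs pvHdr (j : Int) none
  if h : r ≠ -1 ∧ j ≤ cs.length then
    r.toNat :: pvCollectMarks cs (r.toNat + 1)
  else []
termination_by cs.length + 1 - j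
decreasing_by
  have hs := PySem.Chars.findFrom_natCast_spec cs pvHdr j h.2 h.1
  have h1 := hs.1
  omega

def split_sections_by_ticker_py_alt (text : String) (tickers : List String) : List (String × String) :=
  let result : PySem.Dict String String :=
    tickers.foldl (fun d t => d.insert t "") PySem.Dict.empty
  if text.toList = [] then result.items else
  let cs := text.toList
  let marks := pvCollectMarks cs 0
  -- for j in marks: matched = [t for t in pending if text.startswith(t, j+4)];
  --   claims.extend((j, t) for t in matched); pending = [t for t in pending if t not in matched]
  -- (text.startswith(t, j+4) ported as a prefix test on cs.drop (j+4) — exact since j+4 ≤ len for marks)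
  let scan := marks.foldl (fun (st : List (Nat × String) × List String) j =>
      let matched := st.2.filter (fun t => PySem.Chars.startswith (cs.drop (j + 4)) t.toList)
      (st.1 ++ matched.map (fun t => (j, t)), st.2.filter (fun t => !matched.contains t)))
    ([], tickers)
  let claims := scan.1
  -- for k, (start, t) in enumerate(claims): ... result[t] = text[start:end].strip()
  let result2 := (PySem.List.enumerate claims).foldl (fun res it =>
      let endIdx : Int :=
        if it.1 + 1 < PySem.List.len claims
        then ((PySem.List.pyGetD claims (it.1 + 1) (0, "")).1 : Int)
        else PySem.List.len cs
      let block := PySem.Chars.strip (PySem.Chars.slice cs (some (it.2.1 : Int)) (some endIdx))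
      res.insert it.2.2 (String.ofList block)) result
  result2.items

-- ===== PRECONDITION & SPEC =====
def Spec_split_sections_by_ticker_py (text : String) (tickers : List String) (out : List (String × String)) : Prop := out = split_sections_by_ticker_py_alt text tickers
instance (text : String) (tickers : List String) (out : List (String × String)) : Decidable (Spec_split_sections_by_ticker_py text tickers out) := by unfold Spec_split_sections_by_ticker_py; infer_instance

-- ===== CLAIM (what is proved, stated in full; the proofs are below) =====
def Claim_equal_split_sections_by_ticker_py : Prop := ∀ (text : String) (tickers : List String), Dom_split_sections_by_ticker_py text tickers → Spec_split_sections_by_ticker_py text tickers (split_sections_by_ticker_py text tickers)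

-- ===== LEMMAS AND PROOFS =====

-- ---- generic list facts ----

theorem pvPrefix_append_iff {a b l : List Char} :
    a ++ b <+: l ↔ a <+: l ∧ b <+: l.drop a.length := by
  constructor
  · rintro ⟨r, hr⟩
    refine ⟨⟨b ++ r, by simpa using hr⟩, ⟨r, ?_⟩⟩
    subst hr; simp
  · rintro ⟨⟨r1, hr1⟩, ⟨r2, hr2⟩⟩
    refine ⟨r2, ?_⟩
    have : l = a ++ l.drop a.length := by
      conv_lhs => rw [← List.take_append_drop a.length l]
      congr 1
      have := congrArg (List.take a.length) hr1
      simpa using this.symm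
    rw [this, ← hr2, List.append_assoc]

theorem pvFind?_pairwise_eq_some {l : List Nat} (p : Nat → Bool) (a : Nat)
    (h : l.Pairwise (· < ·)) :
    l.find? p = some a ↔ a ∈ l ∧ p a = true ∧ ∀ b ∈ l, b < a → p b = false := by
  induction l with
  | nil => simp
  | cons x xs ih =>
    rcases List.pairwise_cons.mp h with ⟨hx, hxs⟩
    by_cases hp : p x
    · simp only [List.find?_cons, hp]
      constructor
      · rintro h'; cases h'
        exact ⟨List.mem_cons_self, hp, by
          intro b hb hba
          rcases List.mem_cons.mp hb with rfl | hb'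
          · omega
          · exact absurd (hx b hb') (by omega)⟩
      · rintro ⟨hmem, hpa, hmin⟩
        rcases List.mem_cons.mp hmem with rfl | hmem'
        · rfl
        · exact absurd hp (by simpa using hmin x List.mem_cons_self (hx a hmem'))
    · simp only [List.find?_cons, hp, ih hxs]
      constructor
      · rintro ⟨hmem, hpa, hmin⟩
        refine ⟨List.mem_cons_of_mem _ hmem, hpa, ?_⟩
        intro b hb hba
        rcases List.mem_cons.mp hb with rfl | hb'
        · simpa using hp
        · exact hmin b hb' hba
      · rintro ⟨hmem, hpa, hmin⟩
        rcases List.mem_cons.mp hmem with rfl | hmem'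
        · exact absurd hpa hp
        · exact ⟨hmem', hpa, fun b hb hba => hmin b (List.mem_cons_of_mem _ hb) hba⟩

theorem pvFind?_eq_none {l : List Nat} (p : Nat → Bool)
    (h : ∀ b ∈ l, p b = false) : l.find? p = none := by
  simp only [List.find?_eq_none]
  intro x hx
  simp [h x hx]

-- ---- insertBy on grouped lists ----

theorem pvInsertBy_cons {α : Type} (before : α → α → Bool) (x y : α) (ys : List α) :
    PySem.List.insertBy before x (y :: ys)
      = if before x y then x :: y :: ys else y :: PySem.List.insertBy before x ys := by
  rfl

theorem pvInsertBy_skip {α : Type} (before : α → α → Bool) (x : α) (g R : List α)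
    (hg : ∀ y ∈ g, before x y = false) :
    PySem.List.insertBy before x (g ++ R) = g ++ PySem.List.insertBy before x R := by
  induction g with
  | nil => simp
  | cons y g' ih =>
    have hy : before x y = false := hg y List.mem_cons_self
    simp only [List.cons_append, pvInsertBy_cons, hy, Bool.false_eq_true, if_false]
    rw [ih (fun z hz => hg z (List.mem_cons_of_mem _ hz))]

theorem pvInsertBy_front {α : Type} (before : α → α → Bool) (x : α) (R : List α)
    (hR : ∀ y ∈ R, before x y = true) :
    PySem.List.insertBy before x R = x :: R := by
  cases R with
  | nil => rfl
  | cons y R' => simp [pvInsertBy_cons, hR y List.mem_cons_self]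

-- ---- stable sort as a flatten of key groups ----

theorem pvFlatMap_mem_key {l' : List (Int × String)} {ks : List Int} {y : Int × String}
    (hy : y ∈ ks.flatMap (fun m => l'.filter (fun p => p.1 == m))) : y.1 ∈ ks := by
  rcases List.mem_flatMap.mp hy with ⟨m, hm, hy'⟩
  have := List.of_mem_filter hy'
  simp only [beq_iff_eq] at this
  simpa [this] using hm

theorem pvFlatMap_congr {α β : Type} {l : List α} {f g : α → List β}
    (h : ∀ a ∈ l, f a = g a) : l.flatMap f = l.flatMap g := by
  induction l with
  | nil => simp
  | cons a l ih =>
    simp only [List.flatMap_cons, h a List.mem_cons_self]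
    rw [ih (fun a' ha' => h a' (List.mem_cons_of_mem _ ha'))]

theorem pvInsertFlatten (x : Int × String) (l' : List (Int × String)) (ks : List Int)
    (hks : ks.Pairwise (· < ·)) (hx : x.1 ∈ ks) :
    PySem.List.insertBy (fun a b => decide (a.1 < b.1)) x
        (ks.flatMap (fun m => l'.filter (fun p => p.1 == m)))
      = ks.flatMap (fun m => (l' ++ [x]).filter (fun p => p.1 == m)) := by
  induction ks with
  | nil => simp at hx
  | cons m ks' ih =>
    rcases List.pairwise_cons.mp hks with ⟨hm, hks'⟩
    simp only [List.flatMap_cons, List.filter_append]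
    by_cases hxm : x.1 = m
    · -- x joins the end of the first group; later groups are untouched
      rw [pvInsertBy_skip _ _ _ _ (by
        intro y hy
        have hy1 := List.of_mem_filter hy
        simp only [beq_iff_eq] at hy1
        simp [hy1, hxm])]
      rw [pvInsertBy_front _ _ _ (by
        intro y hy
        have h1 : y.1 ∈ ks' := pvFlatMap_mem_key hy
        have h2 := hm y.1 h1
        simp only [decide_eq_true_eq, hxm]
        omega)]
      have hxs : List.filter (fun p => p.1 == m) [x] = [x] := by simp [hxm]
      have h2 : ks'.flatMap (fun m' => l'.filter (fun p => p.1 == m')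
            ++ List.filter (fun p => p.1 == m') [x])
          = ks'.flatMap (fun m' => l'.filter (fun p => p.1 == m')) := by
        apply pvFlatMap_congr
        intro m' hm'
        have h3 := hm m' hm'
        have h4 : ¬ ((x.1 == m') = true) := by simp only [beq_iff_eq, hxm]; omega
        simp [h4]
      rw [hxs, h2]
      simp
    · have hx' : x.1 ∈ ks' := by
        rcases List.mem_cons.mp hx with h | h
        · omega
        · exact h
      rw [pvInsertBy_skip _ _ _ _ (by
        intro y hy
        have hy1 := List.of_mem_filter hy
        simp only [beq_iff_eq] at hy1
        have h2 := hm x.1 hx'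
        simp only [hy1, decide_eq_false_iff_not]
        omega)]
      have hxs : List.filter (fun p => p.1 == m) [x] = [] := by simp [hxm]
      rw [hxs, ih hks' hx']
      simp

theorem pvStableSorted (l : List (Int × String)) (ks : List Int)
    (hks : ks.Pairwise (· < ·)) (hcov : ∀ p ∈ l, p.1 ∈ ks) :
    PySem.List.sorted l (·.1)
      = ks.flatMap (fun m => l.filter (fun p => p.1 == m)) := by
  induction l using List.reverseRecOn with
  | nil => rw [PySem.List.sorted_eq_foldl_insertBy]; simp
  | append_singleton l' x ih =>
    rw [PySem.List.sorted_eq_foldl_insertBy, List.foldl_append, List.foldl_cons, List.foldl_nil,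
      ← PySem.List.sorted_eq_foldl_insertBy,
      ih (fun p hp => hcov p (List.mem_append_left _ hp))]
    exact pvInsertFlatten x l' ks hks (hcov x (List.mem_append_right _ List.mem_cons_self))

-- ---- the marks list ----

theorem pvHdrPrefix_bound {cs : List Char} {i : Nat} (h : pvHdr <+: cs.drop i) :
    i + 4 ≤ cs.length := by
  have h1 := h.length_le
  have h2 : pvHdr.length = 4 := rfl
  simp only [h2, List.length_drop] at h1
  omega

theorem pvCollectMarks_mem_aux (cs : List Char) :
    ∀ n j, cs.length + 1 - j ≤ n → j ≤ cs.length →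
      ∀ i, (i ∈ pvCollectMarks cs j ↔ j ≤ i ∧ pvHdr <+: cs.drop i) := by
  intro n
  induction n with
  | zero => intro j h1 h2; omega
  | succ n ih =>
    intro j h1 hj i
    rw [pvCollectMarks]
    by_cases hc : PySem.Chars.findFrom cs pvHdr (j : Int) none ≠ -1 ∧ j ≤ cs.length
    · simp only [dif_pos hc]
      rcases PySem.Chars.findFrom_natCast_spec cs pvHdr j hj hc.1 with ⟨hjr, hpre, hmin⟩
      set r := PySem.Chars.findFrom cs pvHdr (j : Int) none with hr
      have hr0 : 0 ≤ r := le_trans (by positivity) hjr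
      have hjr' : j ≤ r.toNat := by omega
      have hlt : r.toNat + 4 ≤ cs.length := pvHdrPrefix_bound hpre
      have hih := ih (r.toNat + 1) (by omega) (by omega) i
      simp only [List.mem_cons, hih]
      constructor
      · rintro (rfl | ⟨h2, h3⟩)
        · exact ⟨hjr', hpre⟩
        · exact ⟨by omega, h3⟩
      · rintro ⟨h2, h3⟩
        by_cases h4 : i < r.toNat
        · exact absurd h3 (hmin i h2 h4)
        · by_cases h5 : i = r.toNat
          · exact Or.inl h5
          · exact Or.inr ⟨by omega, h3⟩
    · simp only [dif_neg hc, List.not_mem_nil, false_iff, not_and]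
      intro h2 h3
      have hrneg : PySem.Chars.findFrom cs pvHdr (j : Int) none = -1 := by
        by_contra h4
        exact hc ⟨h4, hj⟩
      rw [PySem.Chars.findFrom_natCast cs pvHdr j hj] at hrneg
      have hinf : pvHdr <:+: cs.drop j := by
        have hd : cs.drop i = (cs.drop j).drop (i - j) := by
          rw [List.drop_drop]
          congr 1
          omega
        rw [hd] at h3
        exact h3.isInfix.trans (List.drop_suffix _ _).isInfix
      have := (PySem.Chars.find_ne_neg_one_iff (cs.drop j) pvHdr).mpr hinf
      split at hrneg
      · next heq => exact this heq
      · next heq =>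
        have h5 : (0:Int) ≤ PySem.Chars.find (cs.drop j) pvHdr := by
          have := PySem.Chars.neg_one_le_find (cs.drop j) pvHdr
          omega
        omega

theorem pvCollectMarks_mem (cs : List Char) {j : Nat} (hj : j ≤ cs.length) (i : Nat) :
    i ∈ pvCollectMarks cs j ↔ j ≤ i ∧ pvHdr <+: cs.drop i :=
  pvCollectMarks_mem_aux cs (cs.length + 1 - j) j le_rfl hj i

theorem pvCollectMarks_sorted_aux (cs : List Char) :
    ∀ n j, cs.length + 1 - j ≤ n → j ≤ cs.length →
      (pvCollectMarks cs j).Pairwise (· < ·) := by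
  intro n
  induction n with
  | zero => intro j h1 h2; omega
  | succ n ih =>
    intro j h1 hj
    rw [pvCollectMarks]
    by_cases hc : PySem.Chars.findFrom cs pvHdr (j : Int) none ≠ -1 ∧ j ≤ cs.length
    · simp only [dif_pos hc]
      rcases PySem.Chars.findFrom_natCast_spec cs pvHdr j hj hc.1 with ⟨hjr, hpre, _⟩
      have hr0 : 0 ≤ PySem.Chars.findFrom cs pvHdr (j : Int) none := le_trans (by positivity) hjr
      have hlt : (PySem.Chars.findFrom cs pvHdr (j : Int) none).toNat + 4 ≤ cs.length :=
        pvHdrPrefix_bound hpre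
      refine List.pairwise_cons.mpr ⟨?_, ih _ (by omega) (by omega)⟩
      intro a ha
      have := (pvCollectMarks_mem cs (j := (PySem.Chars.findFrom cs pvHdr (j : Int) none).toNat + 1)
        (by omega) a).mp ha
      omega
    · simp [dif_neg hc]

-- ---- pairing each element with its successor ----

def pvWN {α : Type} : List α → Option α → List (α × Option α)
  | [], _ => []
  | [x], o => [(x, o)]
  | x :: y :: tl, o => (x, some y) :: pvWN (y :: tl) o

theorem pvWN_length {α : Type} : ∀ (L : List α) (o : Option α), (pvWN L o).length = L.length
  | [], _ => rfl
  | [_], _ => rfl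
  | x :: y :: tl, o => by simp [pvWN, pvWN_length (y :: tl) o]

theorem pvWN_getElem {α : Type} : ∀ (L : List α) (o : Option α) (i : Nat) (h : i < L.length),
    (pvWN L o)[i]'(by rw [pvWN_length]; exact h) = (L[i], (L[i + 1]?).or o)
  | [x], o, 0, h => by simp [pvWN]
  | x :: y :: tl, o, 0, h => by simp [pvWN]
  | x :: y :: tl, o, (i+1), h => by
    have := pvWN_getElem (y :: tl) o i (by simpa using h)
    simp only [pvWN, List.getElem_cons_succ, this, List.getElem?_cons_succ]

theorem pvWN_map {α β : Type} (f : α → β) :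
    ∀ (L : List α) (o : Option α),
    pvWN (L.map f) (o.map f) = (pvWN L o).map (fun p => (f p.1, p.2.map f))
  | [], _ => rfl
  | [x], o => rfl
  | x :: y :: tl, o => by
    have ih := pvWN_map f (y :: tl) o
    simp only [List.map_cons] at ih ⊢
    calc pvWN (f x :: f y :: tl.map f) (o.map f)
        = (f x, some (f y)) :: pvWN (f y :: tl.map f) (o.map f) := rfl
      _ = (f x, some (f y)) :: (pvWN (y :: tl) o).map (fun p => (f p.1, p.2.map f)) := by rw [← ih]
      _ = (pvWN (x :: y :: tl) o).map (fun p => (f p.1, p.2.map f)) := rfl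

-- ---- enumerate ----

theorem pvEnumerate_length {α : Type} (L : List α) (s : Int) :
    (PySem.List.enumerate L s).length = L.length := by
  induction L generalizing s with
  | nil => rfl
  | cons x xs ih => rw [PySem.List.enumerate_cons]; simp [ih]

theorem pvEnumerate_getElem {α : Type} (L : List α) (s : Int) (i : Nat) (h : i < L.length) :
    (PySem.List.enumerate L s)[i]'(by rw [pvEnumerate_length]; exact h)
      = (s + i, L[i]) := by
  induction L generalizing s i with
  | nil => simp at h
  | cons x xs ih =>
    cases i with
    | zero => simp [PySem.List.enumerate_cons]
    | succ i =>
      have h2 := ih (s + 1) i (by simpa using h)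
      simp only [PySem.List.enumerate_cons, List.getElem_cons_succ, h2]
      congr 1
      push_cast
      ring

theorem pvEnumerate_next_map {α β : Type} (L : List α) (dflt : α) (F : α → Option α → β) :
    (PySem.List.enumerate L).map
        (fun it => F it.2
          (if it.1 + 1 < PySem.List.len L
           then some (PySem.List.pyGetD L (it.1 + 1) dflt) else none))
      = (pvWN L none).map (fun p => F p.1 p.2) := by
  apply List.ext_getElem
  · simp [pvEnumerate_length, pvWN_length]
  · intro i h1 h2
    simp only [List.getElem_map]
    rw [pvEnumerate_getElem L 0 i (by simpa [pvEnumerate_length] using h1),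
      pvWN_getElem L none i (by simpa [pvWN_length] using h2)]
    simp only [zero_add, PySem.List.len_eq, Option.or_none]
    have h3 : (i : Int) + 1 = ((i + 1 : Nat) : Int) := by push_cast; ring
    by_cases hc : i + 1 < L.length
    · rw [if_pos (by exact_mod_cast hc)]
      rw [h3, PySem.List.pyGetD_natCast, List.getD_eq_getElem L dflt hc,
        List.getElem?_eq_getElem hc]
    · rw [if_neg (by omega), List.getElem?_eq_none (by omega)]

-- ---- the mark-walking fold of B ----

def pvHit (cs : List Char) (t : String) (j : Nat) : Bool :=
  PySem.Chars.startswith (cs.drop (j + 4)) t.toList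

def pvFH (cs : List Char) (ms : List Nat) (t : String) : Option Nat :=
  ms.find? (pvHit cs t)

def pvGrpIn (cs : List Char) (ms : List Nat) (pend : List String) (j : Nat) : List String :=
  pend.filter (fun t => pvFH cs ms t == some j)

theorem pvScan (cs : List Char) :
    ∀ (ms : List Nat), ms.Pairwise (· < ·) →
    ∀ (ord : List (Nat × String)) (pend : List String),
    ms.foldl (fun (st : List (Nat × String) × List String) j =>
        let matched := st.2.filter (fun t => PySem.Chars.startswith (cs.drop (j + 4)) t.toList)
        (st.1 ++ matched.map (fun t => (j, t)), st.2.filter (fun t => !matched.contains t)))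
      (ord, pend)
      = (ord ++ ms.flatMap (fun j => (pvGrpIn cs ms pend j).map (fun t => (j, t))),
         pend.filter (fun t => pvFH cs ms t == none)) := by
  intro ms
  induction ms with
  | nil =>
    intro _ ord pend
    simp [pvFH]
  | cons j0 ms' ih =>
    intro hms ord pend
    rcases List.pairwise_cons.mp hms with ⟨hj0, hms'⟩
    have hj0nm : j0 ∉ ms' := fun hmem => by have := hj0 j0 hmem; omega
    have hF3 : ∀ t, pvFH cs ms' t = some j0 → False := by
      intro t h
      exact hj0nm (List.mem_of_find?_eq_some h)
    simp only [List.foldl_cons]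
    rw [ih hms' (ord ++ (pend.filter (fun t => PySem.Chars.startswith (cs.drop (j0 + 4)) t.toList)).map (fun t => (j0, t)))
      (pend.filter (fun t => !(pend.filter (fun t => PySem.Chars.startswith (cs.drop (j0 + 4)) t.toList)).contains t))]
    have hpend' : pend.filter (fun t => !(pend.filter (fun t => PySem.Chars.startswith (cs.drop (j0 + 4)) t.toList)).contains t)
        = pend.filter (fun t => !pvHit cs t j0) := by
      apply List.filter_congr
      intro t ht
      congr 1
      by_cases hh : pvHit cs t j0 = true
      · rw [hh]
        exact List.contains_iff_mem.mpr (List.mem_filter.mpr ⟨ht, hh⟩)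
      · have h1 : pvHit cs t j0 = false := by simpa using hh
        rw [h1, Bool.eq_false_iff]
        intro hc
        have h2 := List.mem_filter.mp (List.contains_iff_mem.mp hc)
        rw [pvHit] at h1
        rw [h1] at h2
        exact Bool.false_ne_true h2.2
    have hhits : pend.filter (fun t => PySem.Chars.startswith (cs.drop (j0 + 4)) t.toList)
        = pvGrpIn cs (j0 :: ms') pend j0 := by
      apply List.filter_congr
      intro t ht
      by_cases hh : pvHit cs t j0 = true
      · rw [show PySem.Chars.startswith (cs.drop (j0 + 4)) t.toList = true from hh]
        symm
        simp [pvFH, hh]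
      · have h1 : pvHit cs t j0 = false := by simpa using hh
        rw [show PySem.Chars.startswith (cs.drop (j0 + 4)) t.toList = false from h1]
        symm
        simp only [pvFH, List.find?_cons, h1]
        rw [beq_eq_false_iff_ne]
        exact fun h => hF3 t h
    have hgrp : ∀ j ∈ ms',
        pvGrpIn cs ms' (pend.filter (fun t => !pvHit cs t j0)) j
          = pvGrpIn cs (j0 :: ms') pend j := by
      intro j hj
      have hjne : j0 ≠ j := fun h => hj0nm (h ▸ hj)
      rw [pvGrpIn, pvGrpIn, List.filter_filter]
      apply List.filter_congr
      intro t ht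
      by_cases hh : pvHit cs t j0 = true
      · simp only [pvFH, List.find?_cons, hh, Bool.not_true, Bool.and_false]
        simp [hjne]
      · have h1 : pvHit cs t j0 = false := by simpa using hh
        simp only [pvFH, List.find?_cons, h1, Bool.not_false, Bool.and_true]
    have hnonefil : (pend.filter (fun t => !pvHit cs t j0)).filter (fun t => pvFH cs ms' t == none)
        = pend.filter (fun t => pvFH cs (j0 :: ms') t == none) := by
      rw [List.filter_filter]
      apply List.filter_congr
      intro t ht
      by_cases hh : pvHit cs t j0 = true
      · simp only [pvFH, List.find?_cons, hh, Bool.not_true, Bool.and_false]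
        simp
      · have h1 : pvHit cs t j0 = false := by simpa using hh
        simp only [pvFH, List.find?_cons, h1, Bool.not_false, Bool.and_true]
    rw [hpend', hnonefil]
    congr 1
    rw [hhits]
    have h2 : ms'.flatMap (fun j => (pvGrpIn cs ms' (pend.filter (fun t => !pvHit cs t j0)) j).map (fun t => (j, t)))
        = ms'.flatMap (fun j => (pvGrpIn cs (j0 :: ms') pend j).map (fun t => (j, t))) := by
      apply pvFlatMap_congr
      intro j hj
      rw [hgrp j hj]
    rw [h2, List.flatMap_cons, List.append_assoc]

-- ---- first matching mark = per-ticker find ----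

def pvF (cs : List Char) (t : String) : Int :=
  PySem.Chars.find cs (pvHdr ++ t.toList)

def pvGrp (cs : List Char) (tickers : List String) (m : Nat) : List String :=
  tickers.filter (fun t => pvF cs t == (m : Int))

theorem pvSplit_prefix {cs : List Char} {t : String} {j : Nat} :
    pvHdr ++ t.toList <+: cs.drop j ↔ (pvHdr <+: cs.drop j ∧ t.toList <+: cs.drop (j + 4)) := by
  rw [pvPrefix_append_iff]
  have h1 : (cs.drop j).drop pvHdr.length = cs.drop (j + 4) := by
    rw [List.drop_drop]
    have h2 : j + pvHdr.length = j + 4 := rfl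
    rw [h2]
  rw [h1]

theorem pvInfix_of_prefix_drop {cs sub : List Char} {j : Nat} (h : sub <+: cs.drop j) :
    sub <:+: cs :=
  h.isInfix.trans (cs.drop_suffix j).isInfix

theorem pvFH_marks (cs : List Char) (t : String) :
    pvFH cs (pvCollectMarks cs 0) t
      = if pvF cs t = -1 then none else some (pvF cs t).toNat := by
  have hmem := pvCollectMarks_mem cs (j := 0) (Nat.zero_le _)
  have hsort := pvCollectMarks_sorted_aux cs (cs.length + 1) 0 le_rfl (Nat.zero_le _)
  by_cases hneg : pvF cs t = -1
  · rw [if_pos hneg]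
    apply pvFind?_eq_none
    intro b hb
    rcases (hmem b).mp hb with ⟨_, hpre⟩
    rw [pvHit, ← Bool.not_eq_true]
    intro hhit
    have h2 : t.toList <+: cs.drop (b + 4) := (PySem.Chars.startswith_iff _ _).mp hhit
    have h3 : pvHdr ++ t.toList <+: cs.drop b := pvSplit_prefix.mpr ⟨hpre, h2⟩
    have h4 := pvInfix_of_prefix_drop h3
    exact (PySem.Chars.find_eq_neg_one_iff cs (pvHdr ++ t.toList)).mp hneg h4
  · rw [if_neg hneg]
    have h0 : 0 ≤ pvF cs t := by
      have h := PySem.Chars.neg_one_le_find cs (pvHdr ++ t.toList)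
      simp only [pvF] at hneg ⊢
      omega
    rcases PySem.Chars.find_spec (s := cs) (sub := pvHdr ++ t.toList) h0 with ⟨hpre, hmin⟩
    rcases pvSplit_prefix.mp hpre with ⟨hp1, hp2⟩
    rw [pvFH]
    rw [pvFind?_pairwise_eq_some _ _ hsort]
    refine ⟨(hmem _).mpr ⟨Nat.zero_le _, hp1⟩, (PySem.Chars.startswith_iff _ _).mpr hp2, ?_⟩
    intro b hb hblt
    rcases (hmem b).mp hb with ⟨_, hbpre⟩
    rw [pvHit, ← Bool.not_eq_true]
    intro hhit
    have h2 : t.toList <+: cs.drop (b + 4) := (PySem.Chars.startswith_iff _ _).mp hhit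
    exact hmin b hblt (pvSplit_prefix.mpr ⟨hbpre, h2⟩)

theorem pvGrpIn_eq_pvGrp (cs : List Char) (tickers : List String) (j : Nat) :
    pvGrpIn cs (pvCollectMarks cs 0) tickers j = pvGrp cs tickers j := by
  apply List.filter_congr
  intro t _
  rw [pvFH_marks]
  by_cases hneg : pvF cs t = -1
  · rw [if_pos hneg]
    have h1 : ¬ pvF cs t = (j : Int) := by omega
    simp [hneg, h1]
  · rw [if_neg hneg]
    have h0 : 0 ≤ pvF cs t := by
      have h := PySem.Chars.neg_one_le_find cs (pvHdr ++ t.toList)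
      simp only [pvF] at hneg ⊢
      omega
    by_cases he : pvF cs t = (j : Int)
    · have h3 : (pvF cs t).toNat = j := by omega
      simp [he, h3]
    · have h3 : ¬ (pvF cs t).toNat = j := by omega
      simp [he, h3]

-- ---- A's positions list ----

theorem pvPositionsEq (cs : List Char) (tickers : List String) :
    tickers.foldl (fun ps t =>
        let idx := PySem.Chars.find cs (pvHdr ++ t.toList)
        if idx ≠ -1 then ps ++ [(idx, t)] else ps) ([] : List (Int × String))
      = (tickers.filter (fun t => decide (pvF cs t ≠ -1))).map (fun t => (pvF cs t, t)) := by
  have h : (fun (ps : List (Int × String)) t =>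
        let idx := PySem.Chars.find cs (pvHdr ++ t.toList)
        if idx ≠ -1 then ps ++ [(idx, t)] else ps)
      = (fun ps t => if (fun t => decide (pvF cs t ≠ -1)) t = true
          then ps ++ [(fun t => (pvF cs t, t)) t] else ps) := by
    funext ps t
    show (if PySem.Chars.find cs (pvHdr ++ t.toList) ≠ -1 then _ else _) = _
    by_cases hc : pvF cs t ≠ -1
    · rw [if_pos (by simpa [pvF] using hc), if_pos (by simpa using hc)]
      rfl
    · rw [if_neg (by simpa [pvF] using hc), if_neg (by simpa using hc)]
  rw [h, PySem.List.foldl_append_if]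
  rfl

theorem pvFoundMark (cs : List Char) (t : String) (h : pvF cs t ≠ -1) :
    (pvF cs t).toNat ∈ pvCollectMarks cs 0 ∧ (((pvF cs t).toNat : Nat) : Int) = pvF cs t := by
  have h0 : 0 ≤ pvF cs t := by
    have h1 := PySem.Chars.neg_one_le_find cs (pvHdr ++ t.toList)
    simp only [pvF] at h ⊢
    omega
  rcases PySem.Chars.find_spec (s := cs) (sub := pvHdr ++ t.toList) h0 with ⟨hpre, _⟩
  rcases pvSplit_prefix.mp hpre with ⟨hp1, _⟩
  exact ⟨(pvCollectMarks_mem cs (Nat.zero_le _) _).mpr ⟨Nat.zero_le _, hp1⟩, by omega⟩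

theorem pvPosFilter (cs : List Char) (tickers : List String) (m : Nat) :
    ((tickers.filter (fun t => decide (pvF cs t ≠ -1))).map
        (fun t => (pvF cs t, t))).filter (fun p => p.1 == (m : Int))
      = (pvGrp cs tickers m).map (fun t => ((m : Int), t)) := by
  rw [List.filter_map]
  have h1 : ((fun p : Int × String => p.1 == (m : Int)) ∘ (fun t => (pvF cs t, t)))
      = fun t => pvF cs t == (m : Int) := rfl
  rw [h1, List.filter_filter]
  have h2 : tickers.filter (fun t => (pvF cs t == (m : Int)) && decide (pvF cs t ≠ -1))
      = pvGrp cs tickers m := by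
    rw [pvGrp]
    apply List.filter_congr
    intro t _
    by_cases hc : pvF cs t = (m : Int)
    · have hne : pvF cs t ≠ -1 := by omega
      simp [hc]
    · simp [hc]
  rw [h2]
  apply List.map_congr_left
  intro t ht
  have h3 : pvF cs t = (m : Int) := by
    have h4 := List.mem_filter.mp
      (show t ∈ tickers.filter (fun t => pvF cs t == (m : Int)) from ht)
    simpa using h4.2
  rw [h3]

theorem pvMarksInt_pairwise (cs : List Char) :
    (List.map (fun (m : Nat) => (m : Int)) (pvCollectMarks cs 0)).Pairwise (· < ·) :=
  List.Pairwise.map _ (fun a b h => by exact_mod_cast h)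
    (pvCollectMarks_sorted_aux cs (cs.length + 1) 0 le_rfl (Nat.zero_le _))

theorem pvGrpEmpty (cs : List Char) (tickers : List String)
    (h : tickers.filter (fun t => decide (pvF cs t ≠ -1)) = []) :
    ∀ m, pvGrp cs tickers m = [] := by
  intro m
  rw [pvGrp, List.filter_eq_nil_iff]
  intro t ht
  simp only [beq_iff_eq]
  intro hm
  have h2 : t ∈ tickers.filter (fun t => decide (pvF cs t ≠ -1)) :=
    List.mem_filter.mpr ⟨ht, by simp [hm]⟩
  rw [h] at h2
  simp at h2

-- ---- the sorted positions as a flatten over marks ----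

theorem pvSortedEq (cs : List Char) (tickers : List String) :
    PySem.List.sorted
        ((tickers.filter (fun t => decide (pvF cs t ≠ -1))).map (fun t => (pvF cs t, t)))
        (·.1)
      = (pvCollectMarks cs 0).flatMap
          (fun m => (pvGrp cs tickers m).map (fun t => ((m : Int), t))) := by
  have hcov : ∀ p ∈ (tickers.filter (fun t => decide (pvF cs t ≠ -1))).map
      (fun t => (pvF cs t, t)),
      p.1 ∈ List.map (fun (m : Nat) => (m : Int)) (pvCollectMarks cs 0) := by
    intro p hp
    rcases List.mem_map.mp hp with ⟨t, htf, rfl⟩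
    have h2 : pvF cs t ≠ -1 := by simpa using (List.mem_filter.mp htf).2
    rcases pvFoundMark cs t h2 with ⟨hm, hcast⟩
    exact List.mem_map.mpr ⟨(pvF cs t).toNat, hm, hcast⟩
  rw [pvStableSorted _ _ (pvMarksInt_pairwise cs) hcov]
  rw [List.flatMap_map]
  apply pvFlatMap_congr
  intro m _
  exact pvPosFilter cs tickers m

-- ---- B's claims equal the sorted positions (up to the Nat → Int cast) ----

theorem pvClaimsCast (cs : List Char) (tickers : List String) :
    ((pvCollectMarks cs 0).flatMap
        (fun j => (pvGrp cs tickers j).map (fun t => (j, t)))).map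
      (fun (p : Nat × String) => ((p.1 : Int), p.2))
      = (pvCollectMarks cs 0).flatMap
          (fun m => (pvGrp cs tickers m).map (fun t => ((m : Int), t))) := by
  rw [List.map_flatMap]
  apply pvFlatMap_congr
  intro m _
  rw [List.map_map]
  rfl

-- ---- the two entry folds ----

def pvV (cs : List Char) (a b : Int) : String :=
  String.ofList (PySem.Chars.strip (PySem.Chars.slice cs (some a) (some b)))

def pvFA (cs : List Char) (p : Int × String) (nx : Option (Int × String)) : String × String :=
  (p.2, pvV cs p.1 (nx.elim (PySem.List.len cs) (fun q => q.1)))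

def pvFB (cs : List Char) (p : Nat × String) (nx : Option (Nat × String)) : String × String :=
  (p.2, pvV cs (p.1 : Int) (nx.elim (PySem.List.len cs) (fun q => (q.1 : Int))))

theorem pvFoldPairs {β : Type} (E : List β) (g : β → String × String)
    (d : PySem.Dict String String) :
    E.foldl (fun res it => res.insert (g it).1 (g it).2) d
      = (E.map g).foldl (fun res q => res.insert q.1 q.2) d := by
  rw [List.foldl_map]

theorem pvAFold (cs : List Char) (P : List (Int × String)) (d : PySem.Dict String String) :
    (PySem.List.enumerate P).foldl (fun res it =>
        res.insert it.2.2 (String.ofList (PySem.Chars.strip (PySem.Chars.slice cs (some it.2.1)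
          (some (if it.1 + 1 < PySem.List.len P
                 then (PySem.List.pyGetD P (it.1 + 1) (0, "")).1
                 else PySem.List.len cs)))))) d
      = ((pvWN P none).map (fun p => pvFA cs p.1 p.2)).foldl (fun d q => d.insert q.1 q.2) d := by
  have hA : (fun (res : PySem.Dict String String) (it : Int × (Int × String)) =>
        res.insert it.2.2 (String.ofList (PySem.Chars.strip (PySem.Chars.slice cs (some it.2.1)
          (some (if it.1 + 1 < PySem.List.len P
                 then (PySem.List.pyGetD P (it.1 + 1) (0, "")).1
                 else PySem.List.len cs))))))
      = fun res it =>
          res.insert ((fun it => pvFA cs it.2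
              (if it.1 + 1 < PySem.List.len P
               then some (PySem.List.pyGetD P (it.1 + 1) (0, "")) else none)) it).1
            ((fun it => pvFA cs it.2
              (if it.1 + 1 < PySem.List.len P
               then some (PySem.List.pyGetD P (it.1 + 1) (0, "")) else none)) it).2 := by
    funext res it
    by_cases hc : it.1 + 1 < PySem.List.len P
    · simp only [if_pos hc]
      rfl
    · simp only [if_neg hc]
      rfl
  rw [hA, pvFoldPairs, pvEnumerate_next_map P (0, "") (pvFA cs)]

theorem pvBFold (cs : List Char) (C : List (Nat × String)) (d : PySem.Dict String String) :
    (PySem.List.enumerate C).foldl (fun res it =>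
        res.insert it.2.2 (String.ofList (PySem.Chars.strip (PySem.Chars.slice cs (some (it.2.1 : Int))
          (some (if it.1 + 1 < PySem.List.len C
                 then ((PySem.List.pyGetD C (it.1 + 1) (0, "")).1 : Int)
                 else PySem.List.len cs)))))) d
      = ((pvWN C none).map (fun p => pvFB cs p.1 p.2)).foldl (fun d q => d.insert q.1 q.2) d := by
  have hB : (fun (res : PySem.Dict String String) (it : Int × (Nat × String)) =>
        res.insert it.2.2 (String.ofList (PySem.Chars.strip (PySem.Chars.slice cs (some (it.2.1 : Int))
          (some (if it.1 + 1 < PySem.List.len C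
                 then ((PySem.List.pyGetD C (it.1 + 1) (0, "")).1 : Int)
                 else PySem.List.len cs))))))
      = fun res it =>
          res.insert ((fun it => pvFB cs it.2
              (if it.1 + 1 < PySem.List.len C
               then some (PySem.List.pyGetD C (it.1 + 1) (0, "")) else none)) it).1
            ((fun it => pvFB cs it.2
              (if it.1 + 1 < PySem.List.len C
               then some (PySem.List.pyGetD C (it.1 + 1) (0, "")) else none)) it).2 := by
    funext res it
    by_cases hc : it.1 + 1 < PySem.List.len C
    · simp only [if_pos hc]
      rfl
    · simp only [if_neg hc]
      rfl
  rw [hB, pvFoldPairs, pvEnumerate_next_map C (0, "") (pvFB cs)]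

theorem pvFAB (cs : List Char) (C : List (Nat × String)) :
    (pvWN (C.map (fun (p : Nat × String) => ((p.1 : Int), p.2))) none).map
        (fun p => pvFA cs p.1 p.2)
      = (pvWN C none).map (fun p => pvFB cs p.1 p.2) := by
  have h1 : (none : Option (Int × String))
      = (none : Option (Nat × String)).map (fun (p : Nat × String) => ((p.1 : Int), p.2)) := rfl
  rw [h1, pvWN_map, List.map_map]
  apply List.map_congr_left
  intro p _
  show pvFA cs ((p.1.1 : Int), p.1.2) (p.2.map (fun q => ((q.1 : Int), q.2))) = pvFB cs p.1 p.2
  cases p.2 with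
  | none => rfl
  | some q => rfl

-- ---- main equivalence ----

theorem pvMain (text : String) (tickers : List String) :
    split_sections_by_ticker_py text tickers = split_sections_by_ticker_py_alt text tickers := by
  simp only [split_sections_by_ticker_py, split_sections_by_ticker_py_alt]
  by_cases h0 : text.toList = []
  · rw [if_pos h0, if_pos h0]
  · rw [if_neg h0, if_neg h0]
    rw [pvPositionsEq text.toList tickers]
    rw [pvScan text.toList _ (pvCollectMarks_sorted_aux text.toList (text.toList.length + 1) 0
      le_rfl (Nat.zero_le _)) [] tickers]
    have hgrpin : ∀ j, pvGrpIn text.toList (pvCollectMarks text.toList 0) tickers j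
        = pvGrp text.toList tickers j := pvGrpIn_eq_pvGrp text.toList tickers
    by_cases hP : tickers.filter (fun t => decide (pvF text.toList t ≠ -1)) = []
    · rw [if_pos (by rw [hP]; rfl)]
      have hC : (pvCollectMarks text.toList 0).flatMap
          (fun j => (pvGrpIn text.toList (pvCollectMarks text.toList 0) tickers j).map
            (fun t => (j, t))) = [] := by
        have h1 : ∀ j ∈ pvCollectMarks text.toList 0,
            (pvGrpIn text.toList (pvCollectMarks text.toList 0) tickers j).map
              (fun t => (j, t)) = ([] : List (Nat × String)) := by
          intro j _
          rw [hgrpin j, pvGrpEmpty text.toList tickers hP j]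
          rfl
        rw [pvFlatMap_congr h1]
        simp
      simp only [List.nil_append, hC]
      rfl
    · rw [if_neg (by simpa using hP)]
      simp only [List.nil_append]
      have hclaims : (pvCollectMarks text.toList 0).flatMap
          (fun j => (pvGrpIn text.toList (pvCollectMarks text.toList 0) tickers j).map
            (fun t => (j, t)))
          = (pvCollectMarks text.toList 0).flatMap
              (fun j => (pvGrp text.toList tickers j).map (fun t => (j, t))) := by
        apply pvFlatMap_congr
        intro j _
        rw [hgrpin j]
      rw [hclaims]
      rw [pvSortedEq text.toList tickers, ← pvClaimsCast text.toList tickers]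
      rw [pvAFold text.toList _ _, pvBFold text.toList _ _, pvFAB text.toList _]

-- ===== VERDICT (by name: the statement is the Claim_ definition above) =====
theorem split_sections_by_ticker_py_spec : Claim_equal_split_sections_by_ticker_py := by
  intro text tickers _
  exact pvMain text tickers
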